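-- pv_equiv track=rewrite | github.com/Priyansi/pythonPrograms | vestigium.py | calculateColumns
-- ===== SOURCE A (Python) =====
-- def calculateColumns(array):
--     n = len(array[0])
--     numberColumns = 0
--     for i in range(n):
--         columnList = [array[j][i] for j in range(n)]
--         if len(columnList) != len(set(columnList)):
--             numberColumns += 1
--
--     return str(numberColumns)
-- ===== SOURCE B (Python) =====
-- def calculateColumns(array):
--     n = len(array[0])
--     seen = [set() for _ in range(n)]
--     dup = [False] * n
--     counter = 0
--     for j in range(n):
--         row = array[j]
--         for i in range(n):
--             v = row[i]
--             if not dup[i]: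
--                 if v in seen[i]:
--                     dup[i] = True
--                     counter += 1
--                 else:
--                     seen[i].add(v)
--     return str(counter)
-- ===== Notes on version B (the rewrite author's own statement) =====
-- stated objective: alternative
-- what changed: Row-major single sweep with per-column incremental seen-sets and duplicate flags replaces column-major extraction of each column list and a len(list) vs len(set) comparison; flagged columns skip all further set work.
import Mathlib
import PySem

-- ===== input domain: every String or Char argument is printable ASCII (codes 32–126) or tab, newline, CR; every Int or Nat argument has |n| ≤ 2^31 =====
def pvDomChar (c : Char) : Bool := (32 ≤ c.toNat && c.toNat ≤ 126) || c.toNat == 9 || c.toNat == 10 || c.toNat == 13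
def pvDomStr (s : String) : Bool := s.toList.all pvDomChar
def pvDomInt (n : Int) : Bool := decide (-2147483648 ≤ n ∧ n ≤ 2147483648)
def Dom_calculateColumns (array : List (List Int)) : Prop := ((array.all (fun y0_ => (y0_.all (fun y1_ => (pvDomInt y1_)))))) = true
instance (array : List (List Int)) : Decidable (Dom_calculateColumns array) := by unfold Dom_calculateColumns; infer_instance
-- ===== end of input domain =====

-- B replaces the column-by-column extract-and-compare (len(col) vs len(set(col))) by one
-- row-major sweep maintaining per-column seen-sets and duplicate flags; same cost, different decomposition.

-- ===== PORT A =====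
-- Indexing array[j][i] is ported with getD; under Pre_calculateColumns every index is in range,
-- so this is exact on the admitted inputs.
def calculateColumns (array : List (List Int)) : String :=
  let n := (array.headD []).length
  let numberColumns := (List.range n).foldl (fun acc i =>
      let columnList := (List.range n).map (fun j => (array.getD j []).getD i 0)
      if columnList.length ≠ (PySem.Set.ofList columnList).length then acc + 1 else acc) (0 : Int)
  PySem.Int.toStr numberColumns

-- ===== PORT B =====
-- one cell of B's per-column state: (seen set, duplicate-found flag)
def cellStep (v : Int) (c : PySem.Set Int × Bool) (cnt : Int) :
    (PySem.Set Int × Bool) × Int :=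
  if c.2 then (c, cnt)
  else if PySem.Set.contains c.1 v then ((c.1, true), cnt + 1)
  else ((PySem.Set.add c.1 v, false), cnt)

-- B's inner loop over i: walk the row values and the per-column cells in step
def rowStep : List Int → List (PySem.Set Int × Bool) → Int →
    List (PySem.Set Int × Bool) × Int
  | [], cs, cnt => (cs, cnt)
  | _ :: _, [], cnt => ([], cnt)
  | v :: vs, c :: cs, cnt =>
      let p := cellStep v c cnt
      let q := rowStep vs cs p.2
      (p.1 :: q.1, q.2)

def calculateColumns_alt (array : List (List Int)) : String :=
  let n := (array.headD []).length
  let final := (List.range n).foldl (fun st j =>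
      let row := array.getD j []
      let vals := (List.range n).map (fun i => row.getD i 0)
      rowStep vals st.1 st.2)
    (List.replicate n ((PySem.Set.empty : PySem.Set Int), false), (0 : Int))
  PySem.Int.toStr final.2

-- ===== PRECONDITION & SPEC =====
-- Exactly the inputs on which the Python A returns (no IndexError): the array is nonempty and,
-- with n = len(array[0]), the first n rows exist and each has at least n entries.
def Pre_calculateColumns (array : List (List Int)) : Prop :=
  array ≠ [] ∧ (array.headD []).length ≤ array.length ∧
    ∀ row ∈ array.take (array.headD []).length, (array.headD []).length ≤ row.length
instance (array : List (List Int)) : Decidable (Pre_calculateColumns array) := by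
  unfold Pre_calculateColumns; infer_instance

def pvWitness_calculateColumns : List (List Int) := [[1, 2], [2, 2]]

def Spec_calculateColumns (array : List (List Int)) (out : String) : Prop := out = calculateColumns_alt array
instance (array : List (List Int)) (out : String) : Decidable (Spec_calculateColumns array out) := by unfold Spec_calculateColumns; infer_instance

-- ===== CLAIM (what is proved, stated in full; the proofs are below) =====
def Claim_equal_calculateColumns : Prop := ∀ (array : List (List Int)), Dom_calculateColumns array → Pre_calculateColumns array → Spec_calculateColumns array (calculateColumns array)

-- ===== LEMMAS AND PROOFS =====

-- set(xs) keeps a subsequence of xs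
theorem ofList_sublist (xs : List Int) : (PySem.Set.ofList xs).Sublist xs := by
  induction xs with
  | nil => simp [PySem.Set.ofList_nil]
  | cons x xs ih =>
      rw [PySem.Set.ofList_cons]
      exact List.Sublist.cons₂ x (List.Sublist.trans List.filter_sublist ih)

-- len(xs) == len(set(xs)) iff xs has no duplicates
theorem length_ofList_eq_iff (xs : List Int) :
    (PySem.Set.ofList xs).length = xs.length ↔ xs.Nodup := by
  constructor
  · intro h
    have he := (ofList_sublist xs).eq_of_length h
    rw [← he]
    exact PySem.Set.nodup_ofList xs
  · intro h; rw [PySem.Set.ofList_eq_self_of_nodup xs h]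

-- indicator: 1 if the column (so far) contains a duplicate
def ind (l : List Int) : Int := if l.Nodup then 0 else 1

-- the invariant tying one of B's cells to the column prefix it has consumed
def CellInv (l : List Int) (c : PySem.Set Int × Bool) : Prop :=
  c.2 = !decide l.Nodup ∧ (l.Nodup → c.1 = PySem.Set.ofList l)

theorem nodup_append_singleton (l : List Int) (v : Int) :
    (l ++ [v]).Nodup ↔ l.Nodup ∧ v ∉ l := by
  simp [List.nodup_append]
  exact fun _ => ⟨fun H hv => H v hv rfl, fun H a ha he => H (he ▸ ha)⟩

theorem cellStep_inv (v : Int) (l : List Int) (c : PySem.Set Int × Bool) (cnt : Int)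
    (h : CellInv l c) :
    CellInv (l ++ [v]) (cellStep v c cnt).1 ∧
      (cellStep v c cnt).2 = cnt + (ind (l ++ [v]) - ind l) := by
  obtain ⟨hf, hs⟩ := h
  by_cases hnd : l.Nodup
  · have h2 : c.2 = false := by rw [hf]; simp [hnd]
    have hseen := hs hnd
    by_cases hv : v ∈ l
    · have hnd' : ¬ (l ++ [v]).Nodup := by
        rw [nodup_append_singleton]; tauto
      have hc : PySem.Set.contains c.1 v = true := by
        rw [PySem.Set.contains_iff, hseen, PySem.Set.mem_ofList]; exact hv
      have hcs : cellStep v c cnt = ((c.1, true), cnt + 1) := by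
        simp [cellStep, h2, hseen, PySem.Set.mem_ofList, hv]
      rw [hcs]
      refine ⟨⟨by simp [hnd'], fun h' => absurd h' hnd'⟩, ?_⟩
      simp [ind, hnd, hnd']
    · have hnd' : (l ++ [v]).Nodup := by
        rw [nodup_append_singleton]; exact ⟨hnd, hv⟩
      have hc : PySem.Set.contains c.1 v = false := by
        rw [Bool.eq_false_iff, ne_eq, PySem.Set.contains_iff, hseen, PySem.Set.mem_ofList]
        exact hv
      have hcs : cellStep v c cnt = ((PySem.Set.add c.1 v, false), cnt) := by
        simp [cellStep, h2, hseen, PySem.Set.mem_ofList, hv]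
      rw [hcs]
      refine ⟨⟨by simp [hnd'], fun _ => ?_⟩, ?_⟩
      · rw [hseen, PySem.Set.ofList_append_singleton]
      · simp [ind, hnd, hnd']
  · have h2 : c.2 = true := by rw [hf]; simp [hnd]
    have hnd' : ¬ (l ++ [v]).Nodup := fun h' => hnd ((nodup_append_singleton l v).mp h').1
    have hcs : cellStep v c cnt = (c, cnt) := by simp [cellStep, h2]
    rw [hcs]
    refine ⟨⟨by rw [h2]; simp [hnd'], fun h' => absurd h' hnd'⟩, ?_⟩
    simp [ind, hnd, hnd']

theorem rowStep_inv :
    ∀ (vs : List Int) (ls : List (List Int)) (cs : List (PySem.Set Int × Bool)) (cnt : Int),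
      List.Forall₂ CellInv ls cs → vs.length = ls.length →
      List.Forall₂ CellInv (List.zipWith (fun l v => l ++ [v]) ls vs) (rowStep vs cs cnt).1 ∧
        (rowStep vs cs cnt).2 =
          cnt + (List.zipWith (fun l v => ind (l ++ [v]) - ind l) ls vs).sum := by
  intro vs
  induction vs with
  | nil =>
      intro ls cs cnt hF hlen
      cases hF with
      | nil => simp [rowStep]
      | cons hc hF' => simp at hlen
  | cons v vs ih =>
      intro ls cs cnt hF hlen
      cases hF with
      | nil => simp at hlen
      | cons hc hF' =>
          rename_i l c ls' cs'
          have hcell := cellStep_inv v l c cnt hc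
          have hrest := ih ls' cs' (cellStep v c cnt).2 hF' (by simpa using hlen)
          refine ⟨?_, ?_⟩
          · simp only [rowStep]
            exact List.Forall₂.cons hcell.1 hrest.1
          · simp only [rowStep]
            rw [hrest.2, hcell.2]
            simp [List.sum_cons]
            ring

theorem zipWith_map_map {α β γ δ : Type} (f : β → γ → δ) (g : α → β) (h : α → γ) :
    ∀ (l : List α), List.zipWith f (l.map g) (l.map h) = l.map (fun x => f (g x) (h x)) := by
  intro l; induction l with
  | nil => rfl
  | cons x xs ih => simp [ih]

theorem sum_map_sub_int {α : Type} (f g : α → Int) :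
    ∀ (l : List α), (l.map (fun x => f x - g x)).sum = (l.map f).sum - (l.map g).sum := by
  intro l; induction l with
  | nil => simp
  | cons x xs ih => simp [ih]; ring

-- the value B reads at row j, column i (total form; in range under Pre_)
def valAt (array : List (List Int)) (j i : Nat) : Int := (array.getD j []).getD i 0

-- column i restricted to the first r rows
def prefCol (array : List (List Int)) (r i : Nat) : List Int :=
  (List.range r).map (fun j => valAt array j i)

-- main loop invariant for B's fold over the rows
theorem fold_inv (array : List (List Int)) (n : Nat) :
    ∀ (r : Nat),
      List.Forall₂ CellInv ((List.range n).map (prefCol array r))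
        ((List.range r).foldl (fun st j =>
            rowStep ((List.range n).map (fun i => (array.getD j []).getD i 0)) st.1 st.2)
          (List.replicate n ((PySem.Set.empty : PySem.Set Int), false), (0 : Int))).1 ∧
      ((List.range r).foldl (fun st j =>
            rowStep ((List.range n).map (fun i => (array.getD j []).getD i 0)) st.1 st.2)
          (List.replicate n ((PySem.Set.empty : PySem.Set Int), false), (0 : Int))).2 =
        ((List.range n).map (fun i => ind (prefCol array r i))).sum := by
  intro r
  induction r with
  | zero =>
      refine ⟨?_, by simp [prefCol, ind]⟩
      have hmap : (List.range n).map (prefCol array 0) = List.replicate n ([] : List Int) := by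
        have h0 : prefCol array 0 = fun _ : Nat => ([] : List Int) := rfl
        rw [h0]; simp
      rw [hmap]
      clear hmap
      simp only [List.range_zero, List.foldl_nil]
      induction n with
      | zero => exact List.Forall₂.nil
      | succ m ihm =>
          simp only [List.replicate_succ]
          exact List.Forall₂.cons ⟨by simp, fun _ => rfl⟩ ihm
  | succ r ihr =>
      rw [List.range_succ, List.foldl_append, List.foldl_cons, List.foldl_nil]
      have hlen : ((List.range n).map (fun i => (array.getD r []).getD i 0)).length
          = ((List.range n).map (prefCol array r)).length := by simp
      have hstep := rowStep_inv ((List.range n).map (fun i => (array.getD r []).getD i 0))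
        ((List.range n).map (prefCol array r))
        ((List.range r).foldl (fun st j =>
            rowStep ((List.range n).map (fun i => (array.getD j []).getD i 0)) st.1 st.2)
          (List.replicate n ((PySem.Set.empty : PySem.Set Int), false), (0 : Int))).1
        ((List.range r).foldl (fun st j =>
            rowStep ((List.range n).map (fun i => (array.getD j []).getD i 0)) st.1 st.2)
          (List.replicate n ((PySem.Set.empty : PySem.Set Int), false), (0 : Int))).2
        ihr.1 hlen
      have hcols : List.zipWith (fun l v => l ++ [v]) ((List.range n).map (prefCol array r))
          ((List.range n).map (fun i => (array.getD r []).getD i 0))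
          = (List.range n).map (prefCol array (r + 1)) := by
        rw [zipWith_map_map]
        apply List.map_congr_left
        intro i _
        simp [prefCol, List.range_succ, valAt]
      constructor
      · rw [← hcols]; exact hstep.1
      · rw [hstep.2, ihr.2, zipWith_map_map, sum_map_sub_int]
        have : ((List.range n).map (fun i => ind (prefCol array r i ++ [(array.getD r []).getD i 0]))).sum
            = ((List.range n).map (fun i => ind (prefCol array (r + 1) i))).sum := by
          congr 1
          apply List.map_congr_left
          intro i _
          simp [prefCol, List.range_succ, valAt]
        rw [this]; ring

-- A's fold computes the same sum of indicators
theorem indicator_eq (array : List (List Int)) (acc : Int) (i : Nat) :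
    (let columnList := (List.range (array.headD []).length).map (fun j => (array.getD j []).getD i 0)
     if columnList.length ≠ (PySem.Set.ofList columnList).length then acc + 1 else acc)
      = acc + ind (prefCol array (array.headD []).length i) := by
  simp only [prefCol, valAt, ind]
  by_cases h : ((List.range (array.headD []).length).map
      (fun j => (array.getD j []).getD i 0)).Nodup
  · rw [if_neg (not_not_intro ((length_ofList_eq_iff _).mpr h).symm), if_pos h]
    ring
  · rw [if_pos (fun he => h ((length_ofList_eq_iff _).mp he.symm)), if_neg h]

theorem calcA_sum (array : List (List Int)) :
    calculateColumns array =
      PySem.Int.toStr (((List.range (array.headD []).length).map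
        (fun i => ind (prefCol array (array.headD []).length i))).sum) := by
  unfold calculateColumns
  have hfun : (fun (acc : Int) (i : Nat) =>
      let columnList := (List.range (array.headD []).length).map (fun j => (array.getD j []).getD i 0)
      if columnList.length ≠ (PySem.Set.ofList columnList).length then acc + 1 else acc)
      = (fun (acc : Int) (i : Nat) => acc + ind (prefCol array (array.headD []).length i)) := by
    funext acc i
    exact indicator_eq array acc i
  simp only [hfun, PySem.List.foldl_add]
  simp

-- ===== VERDICT (by name: the statement is the Claim_ definition above) =====
theorem calculateColumns_spec : Claim_equal_calculateColumns := by
  intro array _ _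
  unfold Spec_calculateColumns
  rw [calcA_sum]
  unfold calculateColumns_alt
  congr 1
  exact (fold_inv array (array.headD []).length (array.headD []).length).2.symm
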